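-- pv_equiv track=rewrite | github.com/code-furqaan/Training | Python/Day 2/Calendar/day_finder.py | date_value
-- ===== SOURCE A (Python) =====
-- def is_leap_year(year):
--     return (year%100!=0 and year%4==0) or year%400==0
--
-- def days_in_month(month , year=1990):
--     if month==2:
--         return 28+int(is_leap_year(year))
--     elif (month<8 and month%2!=0) or (month>=8 and month%2==0):
--         return 31
--     else:
--         return 30
--
-- def date_value(month, year):
--     value=0
--     y=year-1
--     value = y * 365 + y//4  - y//100 + y//400
--     m=1
--     while m<month:
--         value+= days_in_month(m,year)
--         m+=1
--     return value%7
-- ===== SOURCE B (Python) =====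
-- def is_leap_year(year):
--     return (year%100!=0 and year%4==0) or year%400==0
--
-- def date_value(month, year):
--     y = year - 1
--     value = y*365 + y//4 - y//100 + y//400
--     n = month - 1          # calendar months fully elapsed before `month`
--     if n > 0:
--         # 31-day months among the first n: the odd ones through July, then the even ones
--         long_months = (n + 1)//2 if n < 8 else n//2 + 1
--         value += 30*n + long_months
--         if n >= 2:         # February contributes 28/29 days, not 30
--             value += is_leap_year(year) - 2
--     return value % 7
-- ===== Notes on version B (the rewrite author's own statement) =====
-- stated objective: faster
-- what changed: Replaces A's per-month while-loop summing days_in_month with a closed-form count: 30 days per elapsed month plus an arithmetic count of the 31-day months (odd through July, even from August) and a February correction, so the month term is O(1) arithmetic with no loop.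
import Mathlib
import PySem

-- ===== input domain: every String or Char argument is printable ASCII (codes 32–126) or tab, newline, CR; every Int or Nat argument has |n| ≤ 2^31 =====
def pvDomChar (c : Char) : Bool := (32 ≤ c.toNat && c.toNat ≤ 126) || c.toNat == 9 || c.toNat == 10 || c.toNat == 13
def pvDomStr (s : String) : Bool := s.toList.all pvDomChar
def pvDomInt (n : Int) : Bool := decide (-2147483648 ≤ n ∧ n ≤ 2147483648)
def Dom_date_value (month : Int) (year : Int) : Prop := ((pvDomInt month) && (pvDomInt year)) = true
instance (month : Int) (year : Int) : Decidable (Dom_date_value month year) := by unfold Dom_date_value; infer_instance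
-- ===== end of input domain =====

-- B replaces A's per-month while-loop with a closed-form day count (30 per elapsed month,
-- an arithmetic count of the 31-day months, a February correction); objective: loop-free O(1) month term.

-- ===== PORT A =====
def is_leap_year (year : Int) : Bool :=
  (PySem.Int.mod year 100 != 0 && PySem.Int.mod year 4 == 0) || PySem.Int.mod year 400 == 0

def days_in_month (month : Int) (year : Int) : Int :=
  if month == 2 then 28 + (if is_leap_year year then 1 else 0)
  else if (month < 8 && PySem.Int.mod month 2 != 0) || (month ≥ 8 && PySem.Int.mod month 2 == 0) then 31
  else 30

-- the 'while m < month' loop of A, carrying (m, value)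
def dvLoop (month : Int) (year : Int) (m : Int) (value : Int) : Int :=
  if m < month then dvLoop month year (m + 1) (value + days_in_month m year) else value
termination_by (month - m).toNat
decreasing_by omega

def date_value (month : Int) (year : Int) : Int :=
  let y := year - 1
  let value := y * 365 + PySem.Int.floordiv y 4 - PySem.Int.floordiv y 100 + PySem.Int.floordiv y 400
  PySem.Int.mod (dvLoop month year 1 value) 7

-- ===== PORT B =====
def is_leap_year_alt (year : Int) : Bool :=
  (PySem.Int.mod year 100 != 0 && PySem.Int.mod year 4 == 0) || PySem.Int.mod year 400 == 0

def date_value_alt (month : Int) (year : Int) : Int :=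
  let y := year - 1
  let value := y * 365 + PySem.Int.floordiv y 4 - PySem.Int.floordiv y 100 + PySem.Int.floordiv y 400
  let n := month - 1
  let value :=
    if 0 < n then
      -- 31-day months among the first n: the odd ones through July, then the even ones
      let long_months := if n < 8 then PySem.Int.floordiv (n + 1) 2 else PySem.Int.floordiv n 2 + 1
      let value := value + 30 * n + long_months
      -- February contributes 28/29 days, not 30
      if 2 ≤ n then value + (if is_leap_year_alt year then 1 else 0) - 2 else value
    else value
  PySem.Int.mod value 7

-- ===== PRECONDITION & SPEC =====
def Spec_date_value (month : Int) (year : Int) (out : Int) : Prop := out = date_value_alt month year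
instance (month : Int) (year : Int) (out : Int) : Decidable (Spec_date_value month year out) := by unfold Spec_date_value; infer_instance

-- ===== CLAIM (what is proved, stated in full; the proofs are below) =====
def Claim_equal_date_value : Prop := ∀ (month : Int) (year : Int), Dom_date_value month year → Spec_date_value month year (date_value month year)

-- ===== LEMMAS AND PROOFS =====

-- B's month term: what B adds to the year term before the final % 7
def gMonth (month : Int) (year : Int) : Int :=
  let n := month - 1
  if 0 < n then
    30 * n + (if n < 8 then PySem.Int.floordiv (n + 1) 2 else PySem.Int.floordiv n 2 + 1) +
      (if 2 ≤ n then (if is_leap_year_alt year then 1 else 0) - 2 else 0)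
  else 0

lemma dvLoop_stop (month year m value : Int) (h : ¬ m < month) :
    dvLoop month year m value = value := by
  rw [dvLoop]; simp [h]

lemma leap_eq (y : Int) : is_leap_year y = is_leap_year_alt y := rfl

lemma dvLoop_succ (year : Int) : ∀ (month m value : Int), m ≤ month →
    dvLoop (month + 1) year m value = dvLoop month year m value + days_in_month month year := by
  intro month m value h
  induction hn : (month - m).toNat generalizing m value with
  | zero =>
    have hm : m = month := by omega
    subst hm
    rw [dvLoop, dvLoop_stop _ _ _ _ (show ¬ m + 1 < m + 1 by omega),
      dvLoop_stop _ _ _ _ (show ¬ m < m by omega)]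
    simp [show m < m + 1 by omega]
  | succ k ih =>
    have hlt : m < month := by omega
    rw [dvLoop, if_pos (show m < month + 1 by omega)]
    conv_rhs => rw [dvLoop, if_pos hlt]
    exact ih (m + 1) (value + days_in_month m year) (by omega) (by omega)

lemma gMonth_step (month year : Int) (h : 1 ≤ month) :
    gMonth (month + 1) year = gMonth month year + days_in_month month year := by
  have hmod := PySem.Int.mod_eq_emod_of_pos (a := month) (b := 2) (by omega)
  have hd1 := PySem.Int.floordiv_eq_ediv_of_pos (a := month - 1) (b := 2) (by omega)
  have hd2 := PySem.Int.floordiv_eq_ediv_of_pos (a := month) (b := 2) (by omega)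
  have hd3 := PySem.Int.floordiv_eq_ediv_of_pos (a := month + 1) (b := 2) (by omega)
  set l : Int := if is_leap_year_alt year then 1 else 0 with hl
  have hl01 : l = 0 ∨ l = 1 := by rw [hl]; split_ifs <;> simp
  simp only [gMonth, days_in_month, leap_eq, ← hl,
    show month + 1 - 1 = month by ring, show month - 1 + 1 = month by ring, hmod, hd1, hd2, hd3,
    Bool.or_eq_true, Bool.and_eq_true, bne_iff_ne, beq_iff_eq, decide_eq_true_eq, ge_iff_le]
  split_ifs <;> first | omega | simp_all

lemma dvLoop_eq_gMonth (month year value : Int) :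
    dvLoop month year 1 value = value + gMonth month year := by
  rcases lt_or_ge month 1 with h1 | h1
  · rw [dvLoop_stop _ _ _ _ (by omega)]
    simp only [gMonth]
    rw [if_neg (by omega)]; ring
  · induction month, h1 using Int.le_induction with
    | base => rw [dvLoop_stop _ _ _ _ (by omega)]; simp [gMonth]
    | succ n hn ih =>
      rw [dvLoop_succ year n 1 value (by omega), ih, gMonth_step n year hn]
      ring

-- ===== VERDICT (by name: the statement is the Claim_ definition above) =====
theorem date_value_spec : Claim_equal_date_value := by
  intro month year _
  unfold Spec_date_value date_value date_value_alt
  dsimp only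
  rw [dvLoop_eq_gMonth]
  unfold gMonth
  dsimp only
  split_ifs <;> (congr 1) <;> ring
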